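-- pv_equiv track=rewrite | github.com/saviovincent/DSA | basic_algo/BasicRecursion.py | count
-- ===== SOURCE A (Python) =====
-- def count(no):
--     if no <= 0:
--         return 0
--     a = no % 10
--
--     if a == 8 and no // 10 % 10 == 8:
--         return 2 + count(no // 10)
--     elif a == 8:
--         return 1 + count(no // 10)
--     else:
--         return 0 + count(no // 10)
-- ===== SOURCE B (Python) =====
-- def count(no):
--     total = 0
--     prev = None
--     while no > 0:
--         d = no % 10
--         if d == 8:
--             total += 1
--             if prev == 8:
--                 total += 1
--         prev = d
--         no //= 10
--     return total
-- ===== Notes on version B (the rewrite author's own statement) =====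
-- stated objective: simpler
-- what changed: Replaced the non-tail recursion that looks ahead at the next digit for the adjacent-pair bonus with an iterative while-loop over the digits keeping a running total and the previously seen digit, crediting each adjacent matching pair at its more significant digit.
import Mathlib
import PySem

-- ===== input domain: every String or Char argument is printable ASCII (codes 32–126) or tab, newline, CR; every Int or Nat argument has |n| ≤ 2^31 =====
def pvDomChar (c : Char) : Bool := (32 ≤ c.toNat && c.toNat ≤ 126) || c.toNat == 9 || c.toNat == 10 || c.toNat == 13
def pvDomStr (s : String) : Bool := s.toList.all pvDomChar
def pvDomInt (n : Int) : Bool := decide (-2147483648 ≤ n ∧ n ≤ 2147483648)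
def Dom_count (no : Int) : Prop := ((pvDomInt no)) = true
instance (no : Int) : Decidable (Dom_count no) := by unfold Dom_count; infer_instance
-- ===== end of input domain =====

-- B replaces the look-ahead recursion by an iterative digit loop tracking the previous digit; same return value (objective: simpler decomposition).

theorem pv_div10_lt (no : Int) (h : ¬ no ≤ 0) :
    (PySem.Int.floordiv no 10).toNat < no.toNat := by
  rw [PySem.Int.floordiv_eq_ediv_of_pos (by omega : (0:Int) < 10)]
  omega

-- ===== PORT A =====
def count (no : Int) : Int :=
  if h : no ≤ 0 then 0
  else
    let a := PySem.Int.mod no 10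
    if a = 8 ∧ PySem.Int.mod (PySem.Int.floordiv no 10) 10 = 8 then
      2 + count (PySem.Int.floordiv no 10)
    else if a = 8 then
      1 + count (PySem.Int.floordiv no 10)
    else
      0 + count (PySem.Int.floordiv no 10)
termination_by no.toNat
decreasing_by all_goals exact pv_div10_lt no h

-- ===== PORT B =====
def countLoop (no : Int) (prev : Option Int) (total : Int) : Int :=
  if h : no > 0 then
    let d := PySem.Int.mod no 10
    let total' := if d = 8 then (if prev = some 8 then total + 1 + 1 else total + 1) else total
    countLoop (PySem.Int.floordiv no 10) (some d) total'
  else total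
termination_by no.toNat
decreasing_by exact pv_div10_lt no (by omega)

def count_alt (no : Int) : Int := countLoop no none 0

-- ===== PRECONDITION & SPEC =====
def Spec_count (no : Int) (out : Int) : Prop := out = count_alt no
instance (no : Int) (out : Int) : Decidable (Spec_count no out) := by unfold Spec_count; infer_instance

-- ===== CLAIM (what is proved, stated in full; the proofs are below) =====
def Claim_equal_count : Prop := ∀ (no : Int), Dom_count no → Spec_count no (count no)

-- ===== LEMMAS AND PROOFS =====

theorem countLoop_char (no : Int) (prev : Option Int) (total : Int) :
    countLoop no prev total =
      total + count no +
        (if 0 < no ∧ PySem.Int.mod no 10 = 8 ∧ prev = some 8 then 1 else 0) := by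
  induction no, prev, total using countLoop.induct with
  | case1 no prev total h d total' ih =>
    rw [countLoop]
    rw [dif_pos h]
    simp only [d, total'] at ih ⊢
    simp only [dite_eq_ite] at ih
    conv_rhs => rw [count]
    rw [dif_neg (by omega : ¬ no ≤ 0)]
    rw [ih]
    have hm : PySem.Int.mod no 10 = no % 10 :=
      PySem.Int.mod_eq_emod_of_pos (by omega)
    have hm2 : PySem.Int.mod (PySem.Int.floordiv no 10) 10 = (PySem.Int.floordiv no 10) % 10 :=
      PySem.Int.mod_eq_emod_of_pos (by omega)
    have hd : PySem.Int.floordiv no 10 = no / 10 :=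
      PySem.Int.floordiv_eq_ediv_of_pos (by omega)
    simp only [d, hm, hd, Option.some.injEq]
    have hpos : (0:Int) < no := h
    split_ifs <;> simp_all <;> omega
  | case2 no prev total h =>
    rw [countLoop, dif_neg h]
    rw [count, dif_pos (by omega : no ≤ 0)]
    have : ¬ (0 < no ∧ PySem.Int.mod no 10 = 8 ∧ prev = some 8) := by
      intro ⟨h1, _⟩; omega
    rw [if_neg this]
    ring

-- ===== VERDICT (by name: the statement is the Claim_ definition above) =====
theorem count_spec : Claim_equal_count := by
  intro no _
  unfold Spec_count count_alt
  rw [countLoop_char]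
  simp
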